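-- pv_equiv track=rewrite | github.com/bastisee/Bachelorthesis_Seelos | Code/Stage4.py | find_clipped_regions
-- ===== SOURCE A (Python) =====
-- def find_clipped_regions(clipped_indices):
--     if len(clipped_indices) == 0:
--         return []
--
--     regions = []
--     start = clipped_indices[0]
--     for i in range(1, len(clipped_indices)):
--         if clipped_indices[i] != clipped_indices[i - 1] + 1:
--             regions.append((start, clipped_indices[i - 1]))
--             start = clipped_indices[i]
--     regions.append((start, clipped_indices[-1]))
--     return regions
-- ===== SOURCE B (Python) =====
-- def find_clipped_regions(clipped_indices):
--     # Build the run boundaries directly: a region starts at the first element and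
--     # after every adjacency break; it ends before every break and at the last element.
--     if not clipped_indices:
--         return []
--     starts = [clipped_indices[0]] + [c for p, c in zip(clipped_indices, clipped_indices[1:]) if c != p + 1]
--     ends = [p for p, c in zip(clipped_indices, clipped_indices[1:]) if c != p + 1] + [clipped_indices[-1]]
--     return list(zip(starts, ends))
-- ===== Notes on version B (the rewrite author's own statement) =====
-- stated objective: alternative
-- what changed: Replaces A's single stateful loop (running start variable plus accumulator, indexed range loop) by a declarative construction: zip the list with its own tail to get adjacent pairs, build the list of region starts and the list of region ends as two comprehensions over the break points, and zip them into the result.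
import Mathlib
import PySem

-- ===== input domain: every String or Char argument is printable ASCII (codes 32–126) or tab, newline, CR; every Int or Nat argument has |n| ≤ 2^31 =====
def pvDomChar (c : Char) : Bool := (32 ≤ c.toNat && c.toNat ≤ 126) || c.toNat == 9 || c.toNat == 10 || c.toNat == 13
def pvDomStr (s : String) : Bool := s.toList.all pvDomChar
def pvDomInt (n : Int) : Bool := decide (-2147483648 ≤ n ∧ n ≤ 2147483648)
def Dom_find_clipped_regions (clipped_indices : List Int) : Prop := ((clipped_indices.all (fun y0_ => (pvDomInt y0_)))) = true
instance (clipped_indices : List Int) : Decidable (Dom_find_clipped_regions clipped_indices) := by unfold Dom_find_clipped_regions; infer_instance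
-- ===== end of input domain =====

-- B replaces A's stateful loop (running start + accumulator) by zipping the list with its
-- tail, collecting region starts and region ends separately, and zipping them together.

-- ===== PORT A =====
def find_clipped_regions (clipped_indices : List Int) : List (Int × Int) :=
  if PySem.List.len clipped_indices = 0 then []
  else
    let st := (PySem.List.pyRange 1 (PySem.List.len clipped_indices) 1).foldl
      (fun (acc : List (Int × Int) × Int) i =>
        if PySem.List.pyGetD clipped_indices i 0 ≠ PySem.List.pyGetD clipped_indices (i - 1) 0 + 1 then
          (acc.1 ++ [(acc.2, PySem.List.pyGetD clipped_indices (i - 1) 0)],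
           PySem.List.pyGetD clipped_indices i 0)
        else acc)
      ([], PySem.List.pyGetD clipped_indices 0 0)
    st.1 ++ [(st.2, PySem.List.pyGetD clipped_indices (-1) 0)]

-- ===== PORT B =====
def find_clipped_regions_alt (clipped_indices : List Int) : List (Int × Int) :=
  if clipped_indices = [] then []
  else
    let pairs := clipped_indices.zip (PySem.List.slice clipped_indices (some 1) none)
    let starts := [PySem.List.pyGetD clipped_indices 0 0] ++
      (pairs.filter (fun q => decide (q.2 ≠ q.1 + 1))).map (·.2)
    let ends := (pairs.filter (fun q => decide (q.2 ≠ q.1 + 1))).map (·.1) ++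
      [PySem.List.pyGetD clipped_indices (-1) 0]
    starts.zip ends

-- ===== PRECONDITION & SPEC =====
def Spec_find_clipped_regions (clipped_indices : List Int) (out : List (Int × Int)) : Prop := out = find_clipped_regions_alt clipped_indices
instance (clipped_indices : List Int) (out : List (Int × Int)) : Decidable (Spec_find_clipped_regions clipped_indices out) := by unfold Spec_find_clipped_regions; infer_instance

-- ===== CLAIM (what is proved, stated in full; the proofs are below) =====
def Claim_equal_find_clipped_regions : Prop := ∀ (clipped_indices : List Int), Dom_find_clipped_regions clipped_indices → Spec_find_clipped_regions clipped_indices (find_clipped_regions clipped_indices)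

-- ===== LEMMAS AND PROOFS =====

-- Common recursive characterisation of the regions of p :: l, with current region start `start`
-- and previous element `p`.
def pvGo (start p : Int) : List Int → List (Int × Int)
  | [] => [(start, p)]
  | c :: l' => if c ≠ p + 1 then (start, p) :: pvGo c c l' else pvGo start c l'

-- starts (after the first) of the runs of p :: l
def pvS (p : Int) : List Int → List Int
  | [] => []
  | c :: l' => if c ≠ p + 1 then c :: pvS c l' else pvS c l'

-- interior ends of the runs of p :: l
def pvE (p : Int) : List Int → List Int
  | [] => []
  | c :: l' => if c ≠ p + 1 then p :: pvE c l' else pvE c l'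

-- A's loop body as a step on (cur, prev) pairs
def pvStepA (acc : List (Int × Int) × Int) (q : Int × Int) : List (Int × Int) × Int :=
  if q.1 ≠ q.2 + 1 then (acc.1 ++ [(acc.2, q.2)], q.1) else acc

theorem pvMapRange (x : Int) (rest : List Int) :
    (PySem.List.pyRange 1 (PySem.List.len (x :: rest)) 1).map
      (fun i => (PySem.List.pyGetD (x :: rest) i 0, PySem.List.pyGetD (x :: rest) (i - 1) 0))
      = rest.zip (x :: rest) := by
  apply List.ext_getElem
  · simp [PySem.List.length_pyRange_one]
  · intro k h1 h2
    have h1' : k < (PySem.List.pyRange 1 (PySem.List.len (x :: rest)) 1).length := by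
      simpa using h1
    have hk : k < rest.length := by
      simpa [PySem.List.length_pyRange_one] using h1'
    have hr : (PySem.List.pyRange 1 (PySem.List.len (x :: rest)) 1)[k] = 1 + (k : Int) :=
      PySem.List.getElem_pyRange_one _ _ _ h1'
    simp only [List.getElem_map, hr]
    have e1 : (1 : Int) + (k : Int) = ((k + 1 : Nat) : Int) := by push_cast; ring
    have e3 : ((k + 1 : Nat) : Int) - 1 = ((k : Nat) : Int) := by push_cast; ring
    rw [e1, e3, PySem.List.pyGetD_natCast, PySem.List.pyGetD_natCast]
    have hk1 : k + 1 < (x :: rest).length := by simpa using Nat.succ_lt_succ hk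
    have hk2 : k < (x :: rest).length := Nat.lt_of_lt_of_le hk (by simp)
    simp only [List.getElem_zip, List.getD_eq_getElem?_getD, List.getElem_cons_succ,
      List.getElem?_eq_getElem hk1, List.getElem?_eq_getElem hk2, Option.getD_some,
      List.getElem_cons_succ]

theorem pvFoldA (l : List Int) : ∀ (p start : Int) (acc : List (Int × Int)),
    ((l.zip (p :: l)).foldl pvStepA (acc, start)).1 ++
      [(((l.zip (p :: l)).foldl pvStepA (acc, start)).2, (p :: l).getLast (List.cons_ne_nil p l))]
      = acc ++ pvGo start p l := by
  induction l with
  | nil => intro p start acc; simp [pvGo]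
  | cons c l' ih =>
    intro p start acc
    have hlast : (p :: c :: l').getLast (List.cons_ne_nil p (c :: l'))
        = (c :: l').getLast (List.cons_ne_nil c l') := List.getLast_cons _
    by_cases hc : c = p + 1
    · subst hc
      have hstep : pvStepA (acc, start) (p + 1, p) = (acc, start) := by simp [pvStepA]
      simp only [List.zip_cons_cons, List.foldl_cons, hstep, hlast, pvGo]
      simpa using ih (p + 1) start acc
    · have hstep : pvStepA (acc, start) (c, p) = (acc ++ [(start, p)], c) := by
        simp [pvStepA, hc]
      simp only [List.zip_cons_cons, List.foldl_cons, hstep, hlast, pvGo, if_pos hc]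
      rw [ih c c (acc ++ [(start, p)])]
      simp

theorem pvGoZip (l : List Int) : ∀ (start p : Int),
    pvGo start p l = (start :: pvS p l).zip
      (pvE p l ++ [(p :: l).getLast (List.cons_ne_nil p l)]) := by
  induction l with
  | nil => intro start p; simp [pvGo, pvS, pvE]
  | cons c l' ih =>
    intro start p
    have hlast : (p :: c :: l').getLast (List.cons_ne_nil p (c :: l'))
        = (c :: l').getLast (List.cons_ne_nil c l') := List.getLast_cons _
    by_cases hc : c = p + 1
    · subst hc
      simp only [pvGo, pvS, pvE, hlast]
      simpa using ih start (p + 1)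
    · simp only [pvGo, pvS, pvE, if_pos hc, hlast, List.cons_append, List.zip_cons_cons]
      rw [ih c c]

theorem pvFilterSnd (l : List Int) : ∀ (p : Int),
    (((p :: l).zip l).filter (fun q => decide (q.2 ≠ q.1 + 1))).map (·.2) = pvS p l := by
  induction l with
  | nil => intro p; simp [pvS]
  | cons c l' ih =>
    intro p
    by_cases hc : c = p + 1
    · subst hc
      simp only [List.zip_cons_cons, List.filter_cons, pvS]
      simpa using ih (p + 1)
    · simp only [List.zip_cons_cons, List.filter_cons, pvS, if_pos hc]
      simpa [hc] using ih c

theorem pvFilterFst (l : List Int) : ∀ (p : Int),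
    (((p :: l).zip l).filter (fun q => decide (q.2 ≠ q.1 + 1))).map (·.1) = pvE p l := by
  induction l with
  | nil => intro p; simp [pvE]
  | cons c l' ih =>
    intro p
    by_cases hc : c = p + 1
    · subst hc
      simp only [List.zip_cons_cons, List.filter_cons, pvE]
      simpa using ih (p + 1)
    · simp only [List.zip_cons_cons, List.filter_cons, pvE, if_pos hc]
      simpa [hc] using ih c

-- ===== VERDICT (by name: the statement is the Claim_ definition above) =====
theorem find_clipped_regions_spec : Claim_equal_find_clipped_regions := by
  intro xs _
  unfold Spec_find_clipped_regions find_clipped_regions find_clipped_regions_alt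
  cases xs with
  | nil => simp
  | cons x rest =>
    have hne : (x :: rest : List Int) ≠ [] := List.cons_ne_nil x rest
    have hlen : PySem.List.len (x :: rest) ≠ 0 := by
      simp only [PySem.List.len_eq]
      intro h
      simp at h
      omega
    simp only [if_neg hlen, if_neg hne]
    have hget0 : PySem.List.pyGetD (x :: rest) 0 0 = x := PySem.List.pyGetD_zero_cons x rest 0
    have hlast : PySem.List.pyGetD (x :: rest) (-1) 0 = (x :: rest).getLast hne :=
      PySem.List.pyGetD_neg_one _ 0 hne
    have hfold :
        (PySem.List.pyRange 1 (PySem.List.len (x :: rest)) 1).foldl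
          (fun (acc : List (Int × Int) × Int) i =>
            if PySem.List.pyGetD (x :: rest) i 0 ≠ PySem.List.pyGetD (x :: rest) (i - 1) 0 + 1 then
              (acc.1 ++ [(acc.2, PySem.List.pyGetD (x :: rest) (i - 1) 0)],
               PySem.List.pyGetD (x :: rest) i 0)
            else acc)
          ([], PySem.List.pyGetD (x :: rest) 0 0)
        = (rest.zip (x :: rest)).foldl pvStepA ([], x) := by
      rw [hget0, ← pvMapRange x rest, List.foldl_map]
      apply PySem.List.foldl_congr_mem
      intro acc i _
      simp [pvStepA]
    rw [hfold]
    have hA := pvFoldA rest x x ([] : List (Int × Int))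
    rw [hlast, hA, List.nil_append]
    -- B side
    rw [PySem.List.slice_from_one]
    simp only [List.tail_cons]
    rw [pvFilterSnd rest x, pvFilterFst rest x, hget0]
    show pvGo x x rest = (x :: pvS x rest).zip (pvE x rest ++ [(x :: rest).getLast hne])
    rw [pvGoZip rest x x]
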